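-- pv_equiv track=rewrite | github.com/vaishvik24/CS515-Project2-BC-calculator | first_cut_extensions.py | relational_cond_var
-- ===== SOURCE A (Python) =====
-- def relational_cond_var(statement):
--     statement = statement.replace(" ", "")
--     var = ''
--     i = 0
--     while i < len(statement):
--         if statement[i].isalpha() or statement[i].isdigit():
--             var += statement[i]
--         elif statement[i] == '=':
--             i += 1
--             break
--         i += 1
--     return var, statement[i:]
-- ===== SOURCE B (Python) =====
-- def relational_cond_var(statement):
--     statement = statement.replace(" ", "")
--     head, _, tail = statement.partition('=')
--     var = ''.join(c for c in head if c.isalpha() or c.isdigit())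
--     return var, tail
-- ===== Notes on version B (the rewrite author's own statement) =====
-- stated objective: simpler
-- what changed: Replaces A's fused index-based while loop (with break, per-character string concatenation and manual slicing) by a decomposition: partition the space-stripped string on the first '=' and do one filtering join pass over the prefix.
import Mathlib
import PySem

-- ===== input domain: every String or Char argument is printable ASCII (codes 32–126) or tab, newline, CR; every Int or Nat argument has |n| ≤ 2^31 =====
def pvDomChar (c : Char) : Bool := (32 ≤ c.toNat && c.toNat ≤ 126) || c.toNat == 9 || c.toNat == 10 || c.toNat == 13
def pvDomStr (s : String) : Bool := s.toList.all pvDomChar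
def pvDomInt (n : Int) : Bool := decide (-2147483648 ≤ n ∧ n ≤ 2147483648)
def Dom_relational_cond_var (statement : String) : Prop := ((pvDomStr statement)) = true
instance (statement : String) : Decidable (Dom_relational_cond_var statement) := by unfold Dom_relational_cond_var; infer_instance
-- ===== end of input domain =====

-- B: partition on the first '=' plus a filtering pass over the prefix, instead of A's fused index loop (simpler decomposition, same cost).


-- ===== PORT A =====
-- A's while loop over the space-stripped string, transliterated as structural
-- recursion on the remaining characters with the accumulated var (var += c ↦ acc ++ [c];
-- the 'elif == "=": i += 1; break' arm returns the rest, i.e. statement[i:]).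
def pvLoopA (acc : List Char) : List Char → String × String
  | [] => (String.ofList acc, String.ofList [])
  | c :: rest =>
    if PySem.Chars.isalpha c || PySem.Chars.isdigit c then pvLoopA (acc ++ [c]) rest
    else if c = '=' then (String.ofList acc, String.ofList rest)
    else pvLoopA acc rest

def relational_cond_var (statement : String) : String × String :=
  pvLoopA [] (PySem.Str.replace statement " " "").toList

-- ===== PORT B =====
-- Source B: strip spaces, partition on the first '=' (span = takeWhile/dropWhile),
-- keep the alpha/digit characters of the prefix.
def relational_cond_var_alt (statement : String) : String × String :=
  let cs := (PySem.Str.replace statement " " "").toList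
  let head := cs.takeWhile (fun c => c != '=')
  let tail := (cs.dropWhile (fun c => c != '=')).drop 1
  (String.ofList (head.filter (fun c => PySem.Chars.isalpha c || PySem.Chars.isdigit c)),
   String.ofList tail)

-- ===== PRECONDITION & SPEC =====
def Spec_relational_cond_var (statement : String) (out : String × String) : Prop := out = relational_cond_var_alt statement
instance (statement : String) (out : String × String) : Decidable (Spec_relational_cond_var statement out) := by unfold Spec_relational_cond_var; infer_instance

-- ===== CLAIM (what is proved, stated in full; the proofs are below) =====
def Claim_equal_relational_cond_var : Prop := ∀ (statement : String), Dom_relational_cond_var statement → Spec_relational_cond_var statement (relational_cond_var statement)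

-- ===== LEMMAS AND PROOFS =====

lemma pvLoopA_eq (cs acc : List Char) :
    pvLoopA acc cs =
      (String.ofList (acc ++ (cs.takeWhile (fun c => c != '=')).filter
          (fun c => PySem.Chars.isalpha c || PySem.Chars.isdigit c)),
       String.ofList ((cs.dropWhile (fun c => c != '=')).drop 1)) := by
  induction cs generalizing acc with
  | nil => simp [pvLoopA]
  | cons c rest ih =>
    by_cases hEq : c = '='
    · subst hEq
      simp [pvLoopA, List.takeWhile, List.dropWhile,
            show PySem.Chars.isalpha '=' = false from rfl,
            show PySem.Chars.isdigit '=' = false from rfl]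
    · have h' : (c != '=') = true := by simp [hEq]
      by_cases hp : (PySem.Chars.isalpha c || PySem.Chars.isdigit c) = true
      · simp [pvLoopA, hp, hEq, h', List.takeWhile, List.dropWhile, ih]
      · simp [pvLoopA, hp, hEq, h', List.takeWhile, List.dropWhile, ih]

-- ===== VERDICT (by name: the statement is the Claim_ definition above) =====
theorem relational_cond_var_spec : Claim_equal_relational_cond_var := by
  intro statement _
  unfold Spec_relational_cond_var relational_cond_var relational_cond_var_alt
  simp [pvLoopA_eq]
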